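-- pv_equiv track=rewrite | github.com/ray-math/youtube | 32 square circle/final/2 in 1.py | find_one_hamiltonian_cycle
-- ===== SOURCE A (Python) =====
-- import math
--
-- def is_perfect_square(n):
--     return math.isqrt(n) ** 2 == n
--
-- def hamiltonian_path_one(graph, vertex, path):
--     path.append(vertex)
--
--     if len(path) == len(graph):
--         if path[0] in graph[path[-1]]:
--             return True
--
--     neighbors = sorted(graph[vertex], key=lambda v: len(graph[v]))
--     for neighbor in neighbors:
--         if neighbor not in path and hamiltonian_path_one(graph, neighbor, path):
--             return True
--
--     path.pop()
--     return False
--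
-- def build_graph(n):
--     graph = {i: set() for i in range(1, n+1)}
--     for i in range(1, n+1):
--         for j in range(i+1, n+1):
--             if is_perfect_square(i + j):
--                 graph[i].add(j)
--                 graph[j].add(i)
--     return graph
--
-- def find_one_hamiltonian_cycle(n):
--     graph = build_graph(n)
--     for start in range(1, n+1):
--         path = []
--         if hamiltonian_path_one(graph, start, path):
--             max_index = path.index(max(path))
--             path = path[max_index:] + path[:max_index]
--             return n, path
--     return n, None
-- ===== SOURCE B (Python) =====
-- import math
--
-- def is_perfect_square(n):
--     return math.isqrt(n) ** 2 == n
--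
-- def build_graph(n):
--     graph = {i: set() for i in range(1, n+1)}
--     for i in range(1, n+1):
--         for j in range(i+1, n+1):
--             if is_perfect_square(i + j):
--                 graph[i].add(j)
--                 graph[j].add(i)
--     return graph
--
-- def find_one_hamiltonian_cycle(n):
--     graph = build_graph(n)
--     target = len(graph)
--     for start in range(1, n+1):
--         # iterative DFS with an explicit stack of neighbor lists
--         path = [start]
--         found = (len(path) == target and path[0] in graph[start])
--         frames = [sorted(graph[start], key=lambda v: len(graph[v]))]
--         while frames and not found:
--             f = frames[-1]
--             if not f:
--                 frames.pop()
--                 path.pop()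
--                 continue
--             nb = f.pop(0)
--             if nb in path:
--                 continue
--             path.append(nb)
--             if len(path) == target and path[0] in graph[nb]:
--                 found = True
--                 break
--             frames.append(sorted(graph[nb], key=lambda v: len(graph[v])))
--         if found:
--             max_index = path.index(max(path))
--             path = path[max_index:] + path[:max_index]
--             return n, path
--     return n, None
-- ===== Notes on version B (the rewrite author's own statement) =====
-- stated objective: alternative
-- what changed: The recursive backtracking helper hamiltonian_path_one is replaced by an iterative DFS with an explicit stack of per-vertex neighbor frames (push on descent, pop on exhaustion), visiting vertices in exactly the same order; build_graph, the degree-sorted neighbor order, the start loop and the final max-rotation are unchanged.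
import Mathlib
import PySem

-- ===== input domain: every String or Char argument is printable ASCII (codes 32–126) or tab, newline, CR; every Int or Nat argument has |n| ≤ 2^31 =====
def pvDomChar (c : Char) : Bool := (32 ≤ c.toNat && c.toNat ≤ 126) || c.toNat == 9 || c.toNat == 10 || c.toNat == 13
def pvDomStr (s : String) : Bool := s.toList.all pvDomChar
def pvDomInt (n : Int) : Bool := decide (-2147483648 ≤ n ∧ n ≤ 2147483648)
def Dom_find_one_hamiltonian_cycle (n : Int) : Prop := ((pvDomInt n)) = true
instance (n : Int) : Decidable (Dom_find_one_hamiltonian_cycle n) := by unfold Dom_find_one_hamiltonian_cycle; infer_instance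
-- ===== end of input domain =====

-- B replaces A's recursive backtracking with an explicit stack-based DFS (same visit order); return values only (A mutates its local path list, not an argument).

-- ===== PORT A =====
-- A's result depends on the iteration order of CPython's int sets (the tie-break of
-- sorted(graph[v], key=len)), so both ports share a hand port of CPython's set layout
-- (setobject.c, add-only, int elements hashing to themselves): open addressing on a
-- power-of-two table, 9 linear probes, perturb = hash, shift 5, resize ×4 when
-- fill*5 ≥ mask*3; iteration = table order. Exact for this file's workload
-- (distinct nonnegative adds), validated against CPython 3.11.
-- probe: index of the slot where CPython places hash h (fuel is generous; a free slot
-- is hit long before it runs out since the table is never more than 3/5 full).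
def pvProbe : Nat → Array (Option Int) → Nat → Nat → Nat → Nat
  | 0, _, _, i, _ => i
  | fuel+1, t, mask, i, perturb =>
    if (t.getD i none).isNone then i
    else
      let lin := if i + 9 ≤ mask then
          (List.range 9).findSome? (fun j => if (t.getD (i+1+j) none).isNone then some (i+1+j) else none)
        else none
      match lin with
      | some s => s
      | none =>
        let perturb' := perturb / 32
        pvProbe fuel t mask ((i*5+1+perturb') % (mask+1)) perturb'

def pvSetInsertRaw (t : Array (Option Int)) (mask : Nat) (v : Int) : Array (Option Int) :=
  let h := v.toNat
  t.set! (pvProbe (64*(mask+1)+64) t mask (h % (mask+1)) h) (some v)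

def pvGrowSize : Nat → Nat → Nat → Nat
  | 0, sz, _ => sz
  | fuel+1, sz, minused => if sz ≤ minused then pvGrowSize fuel (sz*2) minused else sz

structure PySet where
  size  : Nat
  table : Array (Option Int)
  used  : Nat
deriving Repr, DecidableEq

def PySet.empty : PySet := ⟨8, Array.replicate 8 none, 0⟩

def PySet.add (s : PySet) (v : Int) : PySet :=
  let mask := s.size - 1
  let t := pvSetInsertRaw s.table mask v
  let used := s.used + 1
  if used * 5 ≥ mask * 3 then
    let minused := if used > 50000 then used*2 else used*4
    let ns := pvGrowSize 64 8 minused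
    let nt := t.foldl (fun acc e => match e with
      | none => acc
      | some w => pvSetInsertRaw acc (ns-1) w) (Array.replicate ns none)
    ⟨ns, nt, used⟩
  else ⟨s.size, t, used⟩

def PySet.order (s : PySet) : List Int := s.table.toList.filterMap id

def isPerfectSquare (n : Int) : Bool := ((Nat.sqrt n.toNat : Int))^2 == n  -- math.isqrt; exact: only called on positive sums i+j

def buildGraph (n : Int) : PySem.Dict Int PySet :=
  let ks := PySem.List.pyRange 1 (n+1) 1
  let g0 := ks.foldl (fun d i => d.insert i PySet.empty) PySem.Dict.empty
  ks.foldl (fun d i =>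
    (PySem.List.pyRange (i+1) (n+1) 1).foldl (fun d j =>
      if isPerfectSquare (i+j) then
        (d.modify i PySet.empty (fun s => s.add j)).modify j PySet.empty (fun s => s.add i)
      else d) d) g0

def adj (g : PySem.Dict Int PySet) (v : Int) : List Int := (g.getD v PySet.empty).order

-- sorted(graph[vertex], key=lambda v: len(graph[v]))
def sortedNbrs (g : PySem.Dict Int PySet) (v : Int) : List Int :=
  PySem.List.sorted (adj g v) (fun w => (g.getD w PySet.empty).used) false

-- max_index = path.index(max(path)); path[max_index:] + path[:max_index]  (same lines in A and B)
def rotateMax (path : List Int) : List Int :=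
  let mx := (PySem.List.max? path (fun x => x)).getD 0
  let mi : Nat := (PySem.List.index? path mx).getD 0
  PySem.List.slice path (some (mi : Int)) none ++ PySem.List.slice path none (some (mi : Int))

-- hamiltonian_path_one: the fuel argument only bounds recursion depth to make the port
-- total; the top call passes n+1 and the path holds distinct vertices of 1..n, so it
-- never runs out on a reachable state.
mutual
def hamA (g : PySem.Dict Int PySet) : Nat → Int → List Int → Bool × List Int
  | 0, _, path => (false, path)
  | u+1, v, path =>
    let p := path ++ [v]
    if p.length == PySem.Dict.size g && (adj g (p.getLastD 0)).contains (p.headD 0) then (true, p)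
    else loopA g u p (sortedNbrs g v)
termination_by u => (u, 0)
def loopA (g : PySem.Dict Int PySet) : Nat → List Int → List Int → Bool × List Int
  | _, p, [] => (false, p.dropLast)
  | u, p, nb :: ns =>
    if nb ∈ p then loopA g u p ns
    else match hamA g u nb p with
      | (true, p') => (true, p')
      | (false, p') => loopA g u p' ns
termination_by u _ ns => (u, ns.length + 1)
end

def searchA (g : PySem.Dict Int PySet) (N : Nat) : List Int → Option (List Int)
  | [] => none
  | s :: rest =>
    let r := hamA g N s []
    if r.1 then some (rotateMax r.2) else searchA g N rest

def find_one_hamiltonian_cycle (n : Int) : Int × Option (List Int) :=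
  let g := buildGraph n
  (n, searchA g (n.toNat + 1) (PySem.List.pyRange 1 (n+1) 1))

-- ===== PORT B =====
-- largest adjacency-list length in the graph (termination measure bound only)
def maxDeg (g : PySem.Dict Int PySet) : Nat :=
  g.items.foldl (fun m kv => max m kv.2.order.length) 0

def frameWeight (K : Nat) (frames : List (Nat × List Int)) : Nat :=
  (frames.map (fun uf => (uf.2.length + 1) * K ^ uf.1)).sum

theorem adj_len_le_maxDeg (g : PySem.Dict Int PySet) (v : Int) :
    (adj g v).length ≤ maxDeg g := by
  unfold adj maxDeg
  rcases h : g.get? v with _ | s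
  · simp [PySem.Dict.getD_eq_get?_getD, h, PySet.empty, PySet.order]
  · rw [PySem.Dict.getD_eq_get?_getD, h, Option.getD_some]
    have hm : (v, s) ∈ g.items := PySem.Dict.mem_items_of_get?_eq_some g h
    exact (PySem.List.le_foldl_max_nat g.items (fun kv => kv.2.order.length) 0).2 (v, s) hm

-- explicit-stack DFS: frames = (remaining depth, remaining neighbours), top at head;
-- the per-frame depth counter is B's totality guard, mirroring hamA's fuel.
def machine (g : PySem.Dict Int PySet) (path : List Int) (frames : List (Nat × List Int)) :
    Bool × List Int :=
  match frames with
  | [] => (false, path)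
  | (u, []) :: rest => machine g path.dropLast rest
  | (u, nb :: ns) :: rest =>
    if nb ∈ path then machine g path ((u, ns) :: rest)
    else match u with
      | 0 => machine g path ((0, ns) :: rest)
      | u'+1 =>
        let p := path ++ [nb]
        if p.length == PySem.Dict.size g && (adj g nb).contains (p.headD 0) then (true, p)
        else machine g p ((u', sortedNbrs g nb) :: (u'+1, ns) :: rest)
termination_by frameWeight (maxDeg g + 2) frames
decreasing_by
  · unfold frameWeight
    simp only [List.map_cons, List.sum_cons, List.length_nil]
    have hX : 0 < (maxDeg g + 2) ^ u := Nat.pow_pos (by omega)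
    omega
  · unfold frameWeight
    simp only [List.map_cons, List.sum_cons, List.length_cons]
    have hX : 0 < (maxDeg g + 2) ^ u := Nat.pow_pos (by omega)
    have h2 : (ns.length + 1) * (maxDeg g + 2) ^ u < (ns.length + 1 + 1) * (maxDeg g + 2) ^ u := by
      nlinarith [hX]
    exact Nat.add_lt_add_right h2 _
  · unfold frameWeight
    simp only [List.map_cons, List.sum_cons, List.length_cons]
    have hX : 0 < (maxDeg g + 2) ^ (0:Nat) := Nat.pow_pos (by omega)
    have h2 : (ns.length + 1) * (maxDeg g + 2) ^ (0:Nat) < (ns.length + 1 + 1) * (maxDeg g + 2) ^ (0:Nat) := by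
      nlinarith [hX]
    exact Nat.add_lt_add_right h2 _
  · unfold frameWeight
    simp only [List.map_cons, List.sum_cons, List.length_cons, Nat.succ_eq_add_one]
    have hX : 0 < (maxDeg g + 2) ^ u' := Nat.pow_pos (by omega)
    have hlen : (sortedNbrs g nb).length ≤ maxDeg g := by
      unfold sortedNbrs
      rw [PySem.List.length_sorted]
      exact adj_len_le_maxDeg g nb
    have hpow : ((sortedNbrs g nb).length + 1) * (maxDeg g + 2) ^ u' < (maxDeg g + 2) ^ (u' + 1) := by
      rw [pow_succ, mul_comm ((maxDeg g + 2) ^ u') (maxDeg g + 2)]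
      exact Nat.mul_lt_mul_of_lt_of_le (by omega) (le_refl _) hX
    have h2 : (ns.length + 1 + 1) * (maxDeg g + 2) ^ (u' + 1) =
        (ns.length + 1) * (maxDeg g + 2) ^ (u' + 1) + (maxDeg g + 2) ^ (u' + 1) := by
      ring
    omega

def searchB (g : PySem.Dict Int PySet) (u : Nat) : List Int → Option (List Int)
  | [] => none
  | s :: rest =>
    let p0 := [s]
    let r :=
      if p0.length == PySem.Dict.size g && (adj g s).contains (p0.headD 0) then (true, p0)
      else machine g p0 [(u, sortedNbrs g s)]
    if r.1 then some (rotateMax r.2) else searchB g u rest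

def find_one_hamiltonian_cycle_alt (n : Int) : Int × Option (List Int) :=
  let g := buildGraph n
  (n, searchB g n.toNat (PySem.List.pyRange 1 (n+1) 1))

-- ===== PRECONDITION & SPEC =====
def Spec_find_one_hamiltonian_cycle (n : Int) (out : Int × Option (List Int)) : Prop := out = find_one_hamiltonian_cycle_alt n
instance (n : Int) (out : Int × Option (List Int)) : Decidable (Spec_find_one_hamiltonian_cycle n out) := by unfold Spec_find_one_hamiltonian_cycle; infer_instance

-- ===== CLAIM (what is proved, stated in full; the proofs are below) =====
def Claim_equal_find_one_hamiltonian_cycle : Prop := ∀ (n : Int), Dom_find_one_hamiltonian_cycle n → Spec_find_one_hamiltonian_cycle n (find_one_hamiltonian_cycle n)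

-- ===== LEMMAS AND PROOFS =====

-- denotation of a frame stack in terms of A's neighbour loop: try the top frame with
-- loopA, on failure continue with the frames below
def cascade (g : PySem.Dict Int PySet) : List Int → List (Nat × List Int) → Bool × List Int
  | p, [] => (false, p)
  | p, (u, f) :: rest =>
    match loopA g u p f with
    | (true, p') => (true, p')
    | (false, p') => cascade g p' rest



theorem hamA_zero (g : PySem.Dict Int PySet) (v : Int) (path : List Int) : hamA g 0 v path = (false, path) := by
  rw [hamA.eq_def]

theorem hamA_succ (g : PySem.Dict Int PySet) (u : Nat) (v : Int) (path : List Int) :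
    hamA g (u+1) v path =
      (let p := path ++ [v]
       if p.length == PySem.Dict.size g && (adj g (p.getLastD 0)).contains (p.headD 0) then (true, p)
       else loopA g u p (sortedNbrs g v)) := by
  rw [hamA.eq_def]

theorem loopA_nil (g : PySem.Dict Int PySet) (u : Nat) (p : List Int) : loopA g u p [] = (false, p.dropLast) := by
  rw [loopA.eq_def]

theorem loopA_cons (g : PySem.Dict Int PySet) (u : Nat) (p : List Int) (nb : Int) (ns : List Int) :
    loopA g u p (nb :: ns) =
      (if nb ∈ p then loopA g u p ns
       else match hamA g u nb p with
        | (true, p') => (true, p')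
        | (false, p') => loopA g u p' ns) := by
  rw [loopA.eq_def]

theorem machine_nil (g : PySem.Dict Int PySet) (path : List Int) : machine g path [] = (false, path) := by
  rw [machine.eq_def]

theorem machine_pop (g : PySem.Dict Int PySet) (path : List Int) (u : Nat) (rest : List (Nat × List Int)) :
    machine g path ((u, []) :: rest) = machine g path.dropLast rest := by
  rw [machine.eq_def]

theorem machine_cons (g : PySem.Dict Int PySet) (path : List Int) (u : Nat) (nb : Int) (ns : List Int)
    (rest : List (Nat × List Int)) :
    machine g path ((u, nb :: ns) :: rest) =
      (if nb ∈ path then machine g path ((u, ns) :: rest)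
       else match u with
        | 0 => machine g path ((0, ns) :: rest)
        | u'+1 =>
          let p := path ++ [nb]
          if p.length == PySem.Dict.size g && (adj g nb).contains (p.headD 0) then (true, p)
          else machine g p ((u', sortedNbrs g nb) :: (u'+1, ns) :: rest)) := by
  rw [machine.eq_def]


theorem machine_eq_cascade (g : PySem.Dict Int PySet) (path : List Int)
    (frames : List (Nat × List Int)) : machine g path frames = cascade g path frames := by
  induction path, frames using machine.induct g with
  | case1 path => rw [machine_nil, cascade]
  | case2 path u rest ih => rw [machine_pop, ih, cascade, loopA_nil]
  | case3 path u nb ns rest hmem ih =>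
    rw [machine_cons, if_pos hmem, ih, cascade, cascade, loopA_cons, if_pos hmem]
  | case4 path nb ns rest hmem ih =>
    rw [machine_cons, if_neg hmem, ih, cascade, cascade, loopA_cons, if_neg hmem, hamA_zero]
  | case5 path nb ns rest hmem u' p hcond =>
    have hc : ((path ++ [nb]).length == PySem.Dict.size g
        && (adj g nb).contains ((path ++ [nb]).headD 0)) = true := hcond
    rw [machine_cons, if_neg hmem]
    simp only [Nat.succ_eq_add_one]
    rw [cascade, loopA_cons, if_neg hmem, hamA_succ]
    simp only [List.getLastD_concat]
    simp only [hc, if_true]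
  | case6 path nb ns rest hmem u' p hcond ih =>
    have hc : ¬((path ++ [nb]).length == PySem.Dict.size g
        && (adj g nb).contains ((path ++ [nb]).headD 0)) = true := hcond
    have hp : p = path ++ [nb] := rfl
    rw [hp] at ih
    rw [machine_cons, if_neg hmem]
    simp only [Nat.succ_eq_add_one]
    rw [if_neg hc, ih, cascade]
    conv_rhs => rw [cascade, loopA_cons, if_neg hmem, hamA_succ]
    simp only [List.getLastD_concat]
    rw [if_neg hc]
    rcases hr : loopA g u' (path ++ [nb]) (sortedNbrs g nb) with ⟨b, p2⟩
    cases b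
    · show cascade g p2 ((u' + 1, ns) :: rest) =
        match loopA g (u' + 1) p2 ns with
        | (true, p') => (true, p')
        | (false, p') => cascade g p' rest
      rw [cascade]
    · rfl

theorem perStart (g : PySem.Dict Int PySet) (u : Nat) (s : Int) :
    hamA g (u+1) s [] =
      (if (([s] : List Int).length == PySem.Dict.size g
            && (adj g s).contains (([s] : List Int).headD 0)) = true
        then (true, ([s] : List Int))
        else machine g [s] [(u, sortedNbrs g s)]) := by
  rw [hamA_succ, machine_eq_cascade, cascade]
  simp only [List.nil_append]
  have hl : ([s] : List Int).getLastD 0 = s := List.getLastD_concat (l := [])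
  rw [hl]
  split
  · rfl
  · rcases hr : loopA g u [s] (sortedNbrs g s) with ⟨b, p⟩
    cases b
    · show ((false, p) : Bool × List Int) = cascade g p []
      rw [cascade]
    · rfl

theorem search_eq (g : PySem.Dict Int PySet) (u : Nat) (l : List Int) :
    searchA g (u+1) l = searchB g u l := by
  induction l with
  | nil => rfl
  | cons s rest ih => simp only [searchA, searchB, perStart, ih]

theorem find_one_hamiltonian_cycle_spec : Claim_equal_find_one_hamiltonian_cycle := by
  intro n _
  unfold Spec_find_one_hamiltonian_cycle
  simp only [find_one_hamiltonian_cycle, find_one_hamiltonian_cycle_alt, search_eq]
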